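-- pv_equiv track=rewrite | github.com/christ2go/LydiaSyftPlus | scripts/generate_complex_disjunction.py | generate_layered_reachability
-- ===== SOURCE A (Python) =====
-- def generate_layered_reachability(n):
--     """
--     Pattern 5: E(∨_{1≤i≤n} F(ai & ∨_{1≤j≤n} F(ej & F(fj))))
--
--     Two-layer disjunctive reachability - very permissive but complex.
--     """
--     outer_disjuncts = []
--     input_vars = []
--     output_vars = []
--
--     for i in range(1, n + 1):
--         ai = f"a{i}"
--         input_vars.append(ai)
--
--         # Inner disjunction over all outputs
--         inner_disjuncts = []
--         for j in range(1, n + 1):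
--             ej = f"e{j}"
--             fj = f"f{j}"
--             if i == 1:  # Only add to output_vars once
--                 output_vars.extend([ej, fj])
--             inner_disjuncts.append(f"F({ej} & F({fj}))")
--
--         inner = " | ".join(f"({d})" for d in inner_disjuncts)
--         outer_disjuncts.append(f"F({ai} & ({inner}))")
--
--     outer = " | ".join(f"({d})" for d in outer_disjuncts)
--     formula = f"E({outer})"
--
--     return formula, input_vars, output_vars
-- ===== SOURCE B (Python) =====
-- def generate_layered_reachability(n):
--     ks = range(1, n + 1)
--     inner = " | ".join(f"(F(e{j} & F(f{j})))" for j in ks)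
--     input_vars = [f"a{i}" for i in ks]
--     output_vars = [v for j in ks for v in (f"e{j}", f"f{j}")]
--     formula = "E(" + " | ".join(f"(F(a{i} & ({inner})))" for i in ks) + ")"
--     return formula, input_vars, output_vars
-- ===== Notes on version B (the rewrite author's own statement) =====
-- stated objective: simpler
-- what changed: B computes the loop-invariant inner disjunction string once and builds formula, input_vars and output_vars by three independent comprehensions over range(1,n+1), eliminating A's nested double loop with its i==1 side-effect and per-iteration rebuilding of the inner string.
import Mathlib
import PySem

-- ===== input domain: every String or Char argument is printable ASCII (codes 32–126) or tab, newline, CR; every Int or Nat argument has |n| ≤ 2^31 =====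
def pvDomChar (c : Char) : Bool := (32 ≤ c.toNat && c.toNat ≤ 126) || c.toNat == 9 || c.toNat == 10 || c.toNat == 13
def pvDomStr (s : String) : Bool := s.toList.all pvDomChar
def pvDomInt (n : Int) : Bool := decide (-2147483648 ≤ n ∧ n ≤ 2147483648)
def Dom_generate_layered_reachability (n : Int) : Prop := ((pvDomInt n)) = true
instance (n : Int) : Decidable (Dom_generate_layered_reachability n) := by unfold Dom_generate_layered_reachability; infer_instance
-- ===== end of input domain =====

-- B precomputes the loop-invariant inner disjunction once and builds the three results by
-- independent comprehensions, replacing A's nested double loop with its i==1 side effect (simpler).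

-- ===== PORT A =====
-- body of A's inner j-loop (state: output_vars, inner_disjuncts)
def aInnerStep (i : Int) (q : List String × List String) (j : Int) : List String × List String :=
  let ej := "e" ++ PySem.Int.toStr j
  let fj := "f" ++ PySem.Int.toStr j
  ((if i == 1 then q.1 ++ [ej, fj] else q.1),
   q.2 ++ ["F(" ++ ej ++ " & F(" ++ fj ++ "))"])

-- body of A's outer i-loop (state: outer_disjuncts, input_vars, output_vars)
def aOuterStep (R : List Int) (st : List String × List String × List String) (i : Int) :
    List String × List String × List String :=
  let ai := "a" ++ PySem.Int.toStr i
  let q := R.foldl (aInnerStep i) (st.2.2, [])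
  let inner := String.intercalate " | " (q.2.map (fun d => "(" ++ d ++ ")"))
  (st.1 ++ ["F(" ++ ai ++ " & (" ++ inner ++ "))"], st.2.1 ++ [ai], q.1)

def generate_layered_reachability (n : Int) : String × List String × List String :=
  let R := PySem.List.pyRange 1 (n + 1) 1
  let st := R.foldl (aOuterStep R) ([], [], [])
  let outer := String.intercalate " | " (st.1.map (fun d => "(" ++ d ++ ")"))
  ("E(" ++ outer ++ ")", st.2.1, st.2.2)

-- ===== PORT B =====
def generate_layered_reachability_alt (n : Int) : String × List String × List String :=
  let ks := PySem.List.pyRange 1 (n + 1) 1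
  let inner := String.intercalate " | "
    (ks.map (fun j => "(F(e" ++ PySem.Int.toStr j ++ " & F(f" ++ PySem.Int.toStr j ++ ")))"))
  let input_vars := ks.map (fun i => "a" ++ PySem.Int.toStr i)
  let output_vars := ks.flatMap (fun j => ["e" ++ PySem.Int.toStr j, "f" ++ PySem.Int.toStr j])
  let formula := "E(" ++ String.intercalate " | "
    (ks.map (fun i => "(F(a" ++ PySem.Int.toStr i ++ " & (" ++ inner ++ ")))")) ++ ")"
  (formula, input_vars, output_vars)

-- ===== PRECONDITION & SPEC =====
def Spec_generate_layered_reachability (n : Int) (out : String × List String × List String) : Prop := out = generate_layered_reachability_alt n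
instance (n : Int) (out : String × List String × List String) : Decidable (Spec_generate_layered_reachability n out) := by unfold Spec_generate_layered_reachability; infer_instance

-- ===== CLAIM (what is proved, stated in full; the proofs are below) =====
def Claim_equal_generate_layered_reachability : Prop := ∀ (n : Int), Dom_generate_layered_reachability n → Spec_generate_layered_reachability n (generate_layered_reachability n)

-- ===== LEMMAS AND PROOFS =====

-- string-literal merging is proved through toList
lemma wrap_inner (a b : String) :
    "(" ++ ("F(e" ++ a ++ " & F(f" ++ b ++ "))") ++ ")" = "(F(e" ++ a ++ " & F(f" ++ b ++ ")))" := by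
  apply String.toList_inj.mp; simp [String.toList_append]

lemma wrap_outer (s t : String) :
    "(" ++ ("F(a" ++ s ++ " & (" ++ t ++ "))") ++ ")" = "(F(a" ++ s ++ " & (" ++ t ++ ")))" := by
  apply String.toList_inj.mp; simp [String.toList_append]

-- the per-j inner disjunct and the shared inner string, as they come out of A's loops
def innStr (j : Int) : String := "F(e" ++ PySem.Int.toStr j ++ " & F(f" ++ PySem.Int.toStr j ++ "))"
def innerJoin (R : List Int) : String :=
  String.intercalate " | " (R.map (fun j => "(" ++ innStr j ++ ")"))
def pairVars (j : Int) : List String := ["e" ++ PySem.Int.toStr j, "f" ++ PySem.Int.toStr j]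

lemma inner_fold (i : Int) (L : List Int) (q : List String × List String) :
    L.foldl (aInnerStep i) q =
      ((if i == 1 then q.1 ++ L.flatMap pairVars else q.1), q.2 ++ L.map innStr) := by
  induction L generalizing q with
  | nil => simp
  | cons j L ih =>
    simp only [List.foldl_cons, ih, aInnerStep]
    by_cases h : i == 1 <;> simp [h, innStr, pairVars] <;>
      (apply String.toList_inj.mp; simp [String.toList_append])

-- A's outer step, rewritten: the per-i disjunct uses the same inner string for every i
lemma outer_step (R : List Int) (st : List String × List String × List String) (i : Int) :
    aOuterStep R st i =
      (st.1 ++ ["F(a" ++ PySem.Int.toStr i ++ " & (" ++ innerJoin R ++ "))"],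
       st.2.1 ++ ["a" ++ PySem.Int.toStr i],
       if i == 1 then st.2.2 ++ R.flatMap pairVars else st.2.2) := by
  simp only [aOuterStep, inner_fold, innerJoin]
  by_cases h : i == 1 <;> simp [h, Function.comp_def] <;>
    (apply String.toList_inj.mp; simp [String.toList_append])

-- folding the outer loop over indices ≠ 1 leaves output_vars alone and appends disjuncts
lemma outer_fold_ne_one (R : List Int) (L : List Int) (h : ∀ i ∈ L, i ≠ 1)
    (st : List String × List String × List String) :
    L.foldl (aOuterStep R) st =
      (st.1 ++ L.map (fun i => "F(a" ++ PySem.Int.toStr i ++ " & (" ++ innerJoin R ++ "))"),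
       st.2.1 ++ L.map (fun i => "a" ++ PySem.Int.toStr i),
       st.2.2) := by
  induction L generalizing st with
  | nil => simp
  | cons i L ih =>
    have hi : (i == 1) = false := by simpa using h i (List.mem_cons_self ..)
    rw [List.foldl_cons, outer_step, hi]
    rw [ih (fun x hx => h x (List.mem_cons_of_mem _ hx))]
    simp

-- B, rewritten in the same vocabulary
lemma alt_eq (n : Int) :
    generate_layered_reachability_alt n =
      ("E(" ++ String.intercalate " | "
          ((PySem.List.pyRange 1 (n + 1) 1).map
            (fun i => "(" ++ ("F(a" ++ PySem.Int.toStr i ++ " & (" ++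
              innerJoin (PySem.List.pyRange 1 (n + 1) 1) ++ "))") ++ ")")) ++ ")",
       (PySem.List.pyRange 1 (n + 1) 1).map (fun i => "a" ++ PySem.Int.toStr i),
       (PySem.List.pyRange 1 (n + 1) 1).flatMap pairVars) := by
  simp [generate_layered_reachability_alt, innerJoin, innStr, wrap_inner, wrap_outer]
  rfl

-- ===== VERDICT (by name: the statement is the Claim_ definition above) =====
theorem generate_layered_reachability_spec : Claim_equal_generate_layered_reachability := by
  intro n _
  show generate_layered_reachability n = generate_layered_reachability_alt n
  rw [alt_eq]
  simp only [generate_layered_reachability]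
  by_cases hle : n + 1 ≤ 1
  · rw [PySem.List.pyRange_one_eq_nil hle]
    simp
  · have hlt : (1 : Int) < n + 1 := by omega
    rw [PySem.List.pyRange_one_cons hlt]
    rw [List.foldl_cons, outer_step,
        outer_fold_ne_one _ _ (by
          intro i hi
          have := (PySem.List.mem_pyRange_one.mp hi).1
          omega)]
    simp [Function.comp_def]
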